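-- pv_equiv track=rewrite | github.com/Cosmos257/cocotbext-lin-collab | src/cocotbext/lin/utils.py | build_expected_header
-- ===== SOURCE A (Python) =====
-- def compute_parity_bits(pid_bits):
--     p0 = pid_bits[0] ^ pid_bits[1] ^ pid_bits[2] ^ pid_bits[4]
--     p1 = ~(pid_bits[1] ^ pid_bits[3] ^ pid_bits[4] ^ pid_bits[5]) & 0x1
--     return p0, p1
--
-- def build_expected_header(pid):
--     break_field = [0] * 13
--     delimiter = [1]
--     sync_bits = [0] + [int(x) for x in f"{0x55:08b}"[::-1]] + [1]
--
--     pid_bits = [(pid >> i) & 1 for i in range(6)]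
--     p0, p1 = compute_parity_bits(pid_bits)
--     pid_full = pid_bits + [p0, p1]
--     pid_field = [0] + pid_full + [1]
--
--     header_bits = break_field + delimiter + sync_bits + pid_field
--     header_value = 0
--     for bit in header_bits:
--         header_value = (header_value << 1) | bit
--     return header_value, header_bits
-- ===== SOURCE B (Python) =====
-- def build_expected_header(pid):
--     x = pid & 0x3F
--     p0 = ((x >> 0) ^ (x >> 1) ^ (x >> 2) ^ (x >> 4)) & 1
--     p1 = ~((x >> 1) ^ (x >> 3) ^ (x >> 4) ^ (x >> 5)) & 1
--     rev = 0
--     for i in range(6):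
--         rev = (rev << 1) | ((x >> i) & 1)
--     # fields MSB-first: 13 break zeros | delimiter 1 | sync 0,10101010,1 | 0,pid bits LSB-first,p0,p1,1
--     header_value = (0b10101010101 << 10) | (rev << 3) | (p0 << 2) | (p1 << 1) | 1
--     header_bits = [(header_value >> i) & 1 for i in range(33, -1, -1)]
--     return header_value, header_bits
-- ===== Notes on version B (the rewrite author's own statement) =====
-- stated objective: alternative
-- what changed: B composes the whole header integer directly from shifted field constants (sync/delimiter constant, bit-reversed pid field, parity bits) and then expands the bit list from that integer MSB-to-LSB, inverting A's build-the-bit-list-then-fold decomposition.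
import Mathlib
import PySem

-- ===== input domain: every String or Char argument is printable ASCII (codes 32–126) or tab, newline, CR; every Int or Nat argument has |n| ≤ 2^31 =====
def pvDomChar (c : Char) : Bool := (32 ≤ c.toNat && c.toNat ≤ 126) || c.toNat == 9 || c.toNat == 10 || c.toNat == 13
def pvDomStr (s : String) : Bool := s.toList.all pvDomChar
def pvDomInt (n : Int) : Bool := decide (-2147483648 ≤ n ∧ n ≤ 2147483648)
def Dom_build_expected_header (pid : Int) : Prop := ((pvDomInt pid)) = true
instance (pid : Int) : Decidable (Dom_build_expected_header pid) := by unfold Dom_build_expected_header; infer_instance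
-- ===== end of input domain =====

-- B builds the whole header integer first by composing shifted field values and then expands it
-- into the bit list, instead of A's bit-list-first-then-fold; objective: alternative decomposition.

-- ===== PORT A =====
-- helper of A; at the call site pid_bits always has 6 elements, so indices 0..5 are in range
-- and pyGetD with default 0 is exact there
def compute_parity_bits (pid_bits : List Int) : Int × Int :=
  let p0 := PySem.Int.bxor (PySem.Int.bxor (PySem.Int.bxor (PySem.List.pyGetD pid_bits 0 0)
              (PySem.List.pyGetD pid_bits 1 0)) (PySem.List.pyGetD pid_bits 2 0))
              (PySem.List.pyGetD pid_bits 4 0)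
  let p1 := PySem.Int.band (Int.not (PySem.Int.bxor (PySem.Int.bxor (PySem.Int.bxor
              (PySem.List.pyGetD pid_bits 1 0) (PySem.List.pyGetD pid_bits 3 0))
              (PySem.List.pyGetD pid_bits 4 0)) (PySem.List.pyGetD pid_bits 5 0))) 1
  (p0, p1)

def build_expected_header (pid : Int) : Int × List Int :=
  let break_field := List.replicate 13 (0 : Int)
  let delimiter := [(1 : Int)]
  -- f"{0x55:08b}" is the constant string "01010101"; [::-1] is slice? with step -1;
  -- int(x) on a digit character cannot raise, so getD 0 is exact on both Options
  let sync_bits := [(0 : Int)] ++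
    ((PySem.List.slice? "01010101".toList none none (-1)).getD []).map
      (fun x => (PySem.Int.ofChars? [x]).getD 0) ++ [(1 : Int)]
  -- i ranges over [0,6), so i.toNat is exact; Python's >> on int is Lean's >>> on Int
  let pid_bits := (PySem.List.pyRange 0 6 1).map (fun i => PySem.Int.band (pid >>> i.toNat) 1)
  let pp := compute_parity_bits pid_bits
  let pid_full := pid_bits ++ [pp.1, pp.2]
  let pid_field := [(0 : Int)] ++ pid_full ++ [(1 : Int)]
  let header_bits := break_field ++ delimiter ++ sync_bits ++ pid_field
  let header_value := header_bits.foldl (fun hv bit => PySem.Int.bor (hv <<< (1 : Nat)) bit) 0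
  (header_value, header_bits)

-- ===== PORT B =====
def build_expected_header_alt (pid : Int) : Int × List Int :=
  let x := PySem.Int.band pid 0x3F
  let p0 := PySem.Int.band (PySem.Int.bxor (PySem.Int.bxor (PySem.Int.bxor
             (x >>> (0 : Nat)) (x >>> (1 : Nat))) (x >>> (2 : Nat))) (x >>> (4 : Nat))) 1
  let p1 := PySem.Int.band (Int.not (PySem.Int.bxor (PySem.Int.bxor (PySem.Int.bxor
             (x >>> (1 : Nat)) (x >>> (3 : Nat))) (x >>> (4 : Nat))) (x >>> (5 : Nat)))) 1
  let rev := (PySem.List.pyRange 0 6 1).foldl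
             (fun rev i => PySem.Int.bor (rev <<< (1 : Nat)) (PySem.Int.band (x >>> i.toNat) 1)) 0
  let header_value := PySem.Int.bor (PySem.Int.bor (PySem.Int.bor (PySem.Int.bor
             ((1365 : Int) <<< (10 : Nat)) (rev <<< (3 : Nat))) (p0 <<< (2 : Nat)))
             (p1 <<< (1 : Nat))) 1
  -- range(33, -1, -1); i ranges over [0,33], so i.toNat is exact
  let header_bits := (PySem.List.pyRange 33 (-1) (-1)).map
             (fun i => PySem.Int.band (header_value >>> i.toNat) 1)
  (header_value, header_bits)

-- ===== PRECONDITION & SPEC =====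
def Spec_build_expected_header (pid : Int) (out : Int × List Int) : Prop := out = build_expected_header_alt pid
instance (pid : Int) (out : Int × List Int) : Decidable (Spec_build_expected_header pid out) := by unfold Spec_build_expected_header; infer_instance

-- ===== CLAIM (what is proved, stated in full; the proofs are below) =====
def Claim_equal_build_expected_header : Prop := ∀ (pid : Int), Dom_build_expected_header pid → Spec_build_expected_header pid (build_expected_header pid)

-- ===== LEMMAS AND PROOFS =====

lemma band63_eq_emod (a : Int) : PySem.Int.band a 63 = a % 64 := by
  have hand : ∀ n : Nat, n &&& 63 = n % 64 := fun n => by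
    have := Nat.and_two_pow_sub_one_eq_mod n 6
    simpa using this
  simp only [PySem.Int.band]
  split_ifs with h h2 h3
  · rw [show ((63 : Int).toNat) = 63 from rfl, hand]
    omega
  · exact absurd (by norm_num) h2
  · rw [show ((63 : Int).toNat) = 63 from rfl, Nat.and_comm, hand]
    omega
  · exact absurd (by norm_num) h3

-- the low six bits of pid only depend on pid % 64
lemma bitmod (pid : Int) (i : Nat) (h : i ≤ 5) :
    PySem.Int.band (pid >>> (i : Int)) 1 = PySem.Int.band ((pid % 64) >>> (i : Int)) 1 := by
  rw [Int.shiftRight_natCast_right, Int.shiftRight_natCast_right,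
      PySem.Int.band_one, PySem.Int.band_one,
      PySem.Int.mod_eq_emod_of_pos (a := pid >>> i) (by norm_num),
      PySem.Int.mod_eq_emod_of_pos (a := (pid % 64) >>> i) (by norm_num),
      Int.shiftRight_eq_div_pow, Int.shiftRight_eq_div_pow]
  interval_cases i <;> omega

lemma pyRange06 : PySem.List.pyRange 0 6 1 = [0, 1, 2, 3, 4, 5] := by decide

lemma A_mod (pid : Int) : build_expected_header pid = build_expected_header (pid % 64) := by
  have h0 := bitmod pid 0 (by omega)
  have h1 := bitmod pid 1 (by omega)
  have h2 := bitmod pid 2 (by omega)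
  have h3 := bitmod pid 3 (by omega)
  have h4 := bitmod pid 4 (by omega)
  have h5 := bitmod pid 5 (by omega)
  simp only [build_expected_header, pyRange06, List.map_cons, List.map_nil,
    show ((0 : Int).toNat) = 0 from rfl, show ((1 : Int).toNat) = 1 from rfl,
    show ((2 : Int).toNat) = 2 from rfl, show ((3 : Int).toNat) = 3 from rfl,
    show ((4 : Int).toNat) = 4 from rfl, show ((5 : Int).toNat) = 5 from rfl,
    h0, h1, h2, h3, h4, h5]

lemma B_mod (pid : Int) : build_expected_header_alt pid = build_expected_header_alt (pid % 64) := by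
  have hx : PySem.Int.band pid 0x3F = PySem.Int.band (pid % 64) 0x3F := by
    rw [band63_eq_emod, band63_eq_emod, Int.emod_emod_of_dvd _ dvd_rfl]
  simp only [build_expected_header_alt, hx]

set_option maxRecDepth 100000 in
lemma key : ∀ n : Nat, n < 64 → build_expected_header (n : Int) = build_expected_header_alt (n : Int) := by
  decide

-- ===== VERDICT (by name: the statement is the Claim_ definition above) =====
theorem build_expected_header_spec : Claim_equal_build_expected_header := by
  intro pid _
  unfold Spec_build_expected_header
  have hnn : (0 : Int) ≤ pid % 64 := Int.emod_nonneg _ (by norm_num)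
  have hlt : pid % 64 < 64 := Int.emod_lt_of_pos _ (by norm_num)
  have hcast : ((pid % 64).toNat : Int) = pid % 64 := Int.toNat_of_nonneg hnn
  have hn : (pid % 64).toNat < 64 := by omega
  calc build_expected_header pid = build_expected_header (pid % 64) := A_mod pid
    _ = build_expected_header ((pid % 64).toNat : Int) := by rw [hcast]
    _ = build_expected_header_alt ((pid % 64).toNat : Int) := key _ hn
    _ = build_expected_header_alt (pid % 64) := by rw [hcast]
    _ = build_expected_header_alt pid := (B_mod pid).symm
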